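-- pv_equiv track=rewrite | github.com/Brsilheb/gravidez-app | services/emotion_service.py | get_week_message
-- ===== SOURCE A (Python) =====
-- def get_week_message(week: int) -> str:
--     messages = {
--         8: "Tudo ainda parece pequeno por fora, mas por dentro a vida já floresce com força.",
--         12: "Seu bebê já começa a se mexer... mesmo que você ainda não sinta 🤍",
--         16: "A cada semana, o invisível vai ganhando forma, presença e história.",
--         20: "Agora já existe mais do que expectativa: existe vínculo, imaginação e presença.",
--         24: "Seu corpo prepara abrigo. Seu coração prepara amor.",
--         28: "Cada detalhe vivido hoje se tornará memória amanhã.",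
--         32: "Você já não está apenas esperando. Já está se encontrando com esse amor.",
--         36: "Tudo parece mais próximo. O sonho já tem peso, tempo e verdade.",
--         40: "Depois de tantas semanas de espera, amor e construção... o encontro está aqui.",
--     }
--     valid_weeks = sorted(messages.keys())
--     selected = valid_weeks[0]
--     for w in valid_weeks:
--         if week >= w:
--             selected = w
--     return messages[selected]
-- ===== SOURCE B (Python) =====
-- def get_week_message(week: int) -> str:
--     messages = {
--         8: "Tudo ainda parece pequeno por fora, mas por dentro a vida já floresce com força.",
--         12: "Seu bebê já começa a se mexer... mesmo que você ainda não sinta 🤍",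
--         16: "A cada semana, o invisível vai ganhando forma, presença e história.",
--         20: "Agora já existe mais do que expectativa: existe vínculo, imaginação e presença.",
--         24: "Seu corpo prepara abrigo. Seu coração prepara amor.",
--         28: "Cada detalhe vivido hoje se tornará memória amanhã.",
--         32: "Você já não está apenas esperando. Já está se encontrando com esse amor.",
--         36: "Tudo parece mais próximo. O sonho já tem peso, tempo e verdade.",
--         40: "Depois de tantas semanas de espera, amor e construção... o encontro está aqui.",
--     }
--     valid_weeks = sorted(messages)
--     # binary search: lo ends as bisect_right(valid_weeks, week)
--     lo, hi = 0, len(valid_weeks)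
--     while lo < hi:
--         mid = (lo + hi) // 2
--         if week >= valid_weeks[mid]:
--             lo = mid + 1
--         else:
--             hi = mid
--     idx = lo - 1
--     if idx < 0:
--         idx = 0
--     return messages[valid_weeks[idx]]
-- ===== Notes on version B (the rewrite author's own statement) =====
-- stated objective: alternative
-- what changed: Replaces A's linear last-match scan over the sorted thresholds with a hand-written bisect_right binary search plus a clamp to index 0, reproducing the floor-at-8 for weeks below 8.
import Mathlib
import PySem

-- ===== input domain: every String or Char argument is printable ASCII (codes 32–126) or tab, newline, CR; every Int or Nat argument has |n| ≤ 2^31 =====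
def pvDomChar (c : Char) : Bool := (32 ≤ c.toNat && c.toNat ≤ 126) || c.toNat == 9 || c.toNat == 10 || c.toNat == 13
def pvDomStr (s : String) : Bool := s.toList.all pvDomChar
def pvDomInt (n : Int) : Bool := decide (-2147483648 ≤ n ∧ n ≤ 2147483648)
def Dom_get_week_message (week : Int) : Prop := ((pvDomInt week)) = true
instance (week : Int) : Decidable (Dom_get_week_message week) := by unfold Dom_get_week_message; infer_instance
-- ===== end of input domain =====

-- B replaces A's linear last-match scan over the sorted thresholds by a binary search (bisect_right) with a clamp at 0; alternative algorithm, same result.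
-- ===== PORT A =====
-- the literal message dict both Source A and Source B contain, in Python insertion order (shared to avoid a duplicated literal)
def pvMsgsA : PySem.Dict Int String := PySem.Dict.ofList [
  ((8 : Int), "Tudo ainda parece pequeno por fora, mas por dentro a vida já floresce com força."),
  ((12 : Int), "Seu bebê já começa a se mexer... mesmo que você ainda não sinta 🤍"),
  ((16 : Int), "A cada semana, o invisível vai ganhando forma, presença e história."),
  ((20 : Int), "Agora já existe mais do que expectativa: existe vínculo, imaginação e presença."),
  ((24 : Int), "Seu corpo prepara abrigo. Seu coração prepara amor."),
  ((28 : Int), "Cada detalhe vivido hoje se tornará memória amanhã."),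
  ((32 : Int), "Você já não está apenas esperando. Já está se encontrando com esse amor."),
  ((36 : Int), "Tudo parece mais próximo. O sonho já tem peso, tempo e verdade."),
  ((40 : Int), "Depois de tantas semanas de espera, amor e construção... o encontro está aqui.")]

-- transliteration of A: sorted keys, linear last-match scan, then dict lookup
-- (valid_weeks[0] and messages[selected] always succeed on this literal dict; ported
--  with the total getD forms, default never used)
def get_week_message (week : Int) : String :=
  let valid_weeks := PySem.List.sorted pvMsgsA.keys (fun x => x) false
  let selected := valid_weeks.foldl
    (fun selected w => if week ≥ w then w else selected)
    (PySem.List.pyGetD valid_weeks 0 0)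
  pvMsgsA.getD selected ""

-- ===== PORT B =====
-- the hand-written bisect_right loop of Source B (lo, hi are list indices, so Nat;
-- (lo+hi)/2 on Nat is exactly Python's // on these nonnegative ints)
def pvBisect (week : Int) (vw : List Int) (lo hi : Nat) : Nat :=
  if lo < hi then
    let mid := (lo + hi) / 2
    if week ≥ PySem.List.pyGetD vw (mid : Int) 0 then pvBisect week vw (mid + 1) hi
    else pvBisect week vw lo mid
  else lo
termination_by hi - lo
decreasing_by all_goals omega

-- transliteration of B: binary search for bisect_right, clamp, lookup
def get_week_message_alt (week : Int) : String :=
  let valid_weeks := PySem.List.sorted pvMsgsA.keys (fun x => x) false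
  let lo := pvBisect week valid_weeks 0 valid_weeks.length
  let idx : Int := (lo : Int) - 1
  let idx := if idx < 0 then 0 else idx
  pvMsgsA.getD (PySem.List.pyGetD valid_weeks idx 0) ""

-- ===== PRECONDITION & SPEC =====
def Spec_get_week_message (week : Int) (out : String) : Prop := out = get_week_message_alt week
instance (week : Int) (out : String) : Decidable (Spec_get_week_message week out) := by unfold Spec_get_week_message; infer_instance

-- ===== CLAIM (what is proved, stated in full; the proofs are below) =====
def Claim_equal_get_week_message : Prop := ∀ (week : Int), Dom_get_week_message week → Spec_get_week_message week (get_week_message week)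

-- ===== LEMMAS AND PROOFS =====
theorem sorted_keys_A : PySem.List.sorted pvMsgsA.keys (fun x => x) false = [8, 12, 16, 20, 24, 28, 32, 36, 40] := by decide

-- ===== VERDICT (by name: the statement is the Claim_ definition above) =====
-- 10 regions between consecutive thresholds; in each, every comparison both programs make
-- is decided by omega and both sides reduce to the same dict lookup.
theorem get_week_message_spec : Claim_equal_get_week_message := by
  intro week _
  unfold Spec_get_week_message get_week_message get_week_message_alt
  rw [sorted_keys_A]
  by_cases h40 : (40:Int) ≤ week
  · simp [pvBisect, List.foldl, PySem.List.pyGetD,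
      show (8:Int) ≤ week from by omega, show (12:Int) ≤ week from by omega, show (16:Int) ≤ week from by omega, show (20:Int) ≤ week from by omega, show (24:Int) ≤ week from by omega, show (28:Int) ≤ week from by omega, show (32:Int) ≤ week from by omega, show (36:Int) ≤ week from by omega, show (40:Int) ≤ week from by omega]
  by_cases h36 : (36:Int) ≤ week
  · simp [pvBisect, List.foldl, PySem.List.pyGetD,
      show (8:Int) ≤ week from by omega, show (12:Int) ≤ week from by omega, show (16:Int) ≤ week from by omega, show (20:Int) ≤ week from by omega, show (24:Int) ≤ week from by omega, show (28:Int) ≤ week from by omega, show (32:Int) ≤ week from by omega, show (36:Int) ≤ week from by omega, show ¬(40:Int) ≤ week from by omega]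
  by_cases h32 : (32:Int) ≤ week
  · simp [pvBisect, List.foldl, PySem.List.pyGetD,
      show (8:Int) ≤ week from by omega, show (12:Int) ≤ week from by omega, show (16:Int) ≤ week from by omega, show (20:Int) ≤ week from by omega, show (24:Int) ≤ week from by omega, show (28:Int) ≤ week from by omega, show (32:Int) ≤ week from by omega, show ¬(36:Int) ≤ week from by omega, show ¬(40:Int) ≤ week from by omega]
  by_cases h28 : (28:Int) ≤ week
  · simp [pvBisect, List.foldl, PySem.List.pyGetD,
      show (8:Int) ≤ week from by omega, show (12:Int) ≤ week from by omega, show (16:Int) ≤ week from by omega, show (20:Int) ≤ week from by omega, show (24:Int) ≤ week from by omega, show (28:Int) ≤ week from by omega, show ¬(32:Int) ≤ week from by omega, show ¬(36:Int) ≤ week from by omega, show ¬(40:Int) ≤ week from by omega]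
  by_cases h24 : (24:Int) ≤ week
  · simp [pvBisect, List.foldl, PySem.List.pyGetD,
      show (8:Int) ≤ week from by omega, show (12:Int) ≤ week from by omega, show (16:Int) ≤ week from by omega, show (20:Int) ≤ week from by omega, show (24:Int) ≤ week from by omega, show ¬(28:Int) ≤ week from by omega, show ¬(32:Int) ≤ week from by omega, show ¬(36:Int) ≤ week from by omega, show ¬(40:Int) ≤ week from by omega]
  by_cases h20 : (20:Int) ≤ week
  · simp [pvBisect, List.foldl, PySem.List.pyGetD,
      show (8:Int) ≤ week from by omega, show (12:Int) ≤ week from by omega, show (16:Int) ≤ week from by omega, show (20:Int) ≤ week from by omega, show ¬(24:Int) ≤ week from by omega, show ¬(28:Int) ≤ week from by omega, show ¬(32:Int) ≤ week from by omega, show ¬(36:Int) ≤ week from by omega, show ¬(40:Int) ≤ week from by omega]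
  by_cases h16 : (16:Int) ≤ week
  · simp [pvBisect, List.foldl, PySem.List.pyGetD,
      show (8:Int) ≤ week from by omega, show (12:Int) ≤ week from by omega, show (16:Int) ≤ week from by omega, show ¬(20:Int) ≤ week from by omega, show ¬(24:Int) ≤ week from by omega, show ¬(28:Int) ≤ week from by omega, show ¬(32:Int) ≤ week from by omega, show ¬(36:Int) ≤ week from by omega, show ¬(40:Int) ≤ week from by omega]
  by_cases h12 : (12:Int) ≤ week
  · simp [pvBisect, List.foldl, PySem.List.pyGetD,
      show (8:Int) ≤ week from by omega, show (12:Int) ≤ week from by omega, show ¬(16:Int) ≤ week from by omega, show ¬(20:Int) ≤ week from by omega, show ¬(24:Int) ≤ week from by omega, show ¬(28:Int) ≤ week from by omega, show ¬(32:Int) ≤ week from by omega, show ¬(36:Int) ≤ week from by omega, show ¬(40:Int) ≤ week from by omega]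
  by_cases h8 : (8:Int) ≤ week
  · simp [pvBisect, List.foldl, PySem.List.pyGetD,
      show (8:Int) ≤ week from by omega, show ¬(12:Int) ≤ week from by omega, show ¬(16:Int) ≤ week from by omega, show ¬(20:Int) ≤ week from by omega, show ¬(24:Int) ≤ week from by omega, show ¬(28:Int) ≤ week from by omega, show ¬(32:Int) ≤ week from by omega, show ¬(36:Int) ≤ week from by omega, show ¬(40:Int) ≤ week from by omega]
  · simp [pvBisect, List.foldl, PySem.List.pyGetD,
      show ¬(8:Int) ≤ week from by omega, show ¬(12:Int) ≤ week from by omega, show ¬(16:Int) ≤ week from by omega, show ¬(20:Int) ≤ week from by omega, show ¬(24:Int) ≤ week from by omega, show ¬(28:Int) ≤ week from by omega, show ¬(32:Int) ≤ week from by omega, show ¬(36:Int) ≤ week from by omega, show ¬(40:Int) ≤ week from by omega]
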